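-- pv_equiv track=rewrite | github.com/Jaesang98/CodingTest | Programmers/Python3/LV0/02-13.py | solution
-- ===== SOURCE A (Python) =====
-- def solution(n):
--     answer = 1
--     for i in range(1,11) :
--         answer *= i
--         if answer == n :
--             return i
--         elif answer > n :
--             return i -1
-- ===== SOURCE B (Python) =====
-- _FACT = [1, 2, 6, 24, 120, 720, 5040, 40320, 362880, 3628800]
--
-- def solution(n):
--     # binary search for the first factorial >= n in the precomputed table
--     lo, hi = 0, len(_FACT)
--     while lo < hi:
--         mid = (lo + hi) // 2
--         if _FACT[mid] < n:
--             lo = mid + 1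
--         else:
--             hi = mid
--     if lo == len(_FACT):
--         return None
--     return lo + 1 if _FACT[lo] == n else lo
-- ===== Notes on version B (the rewrite author's own statement) =====
-- stated objective: alternative
-- what changed: Replaces A's incremental factorial-accumulating loop with a binary search over a precomputed 10-entry factorial table.
-- outside the precondition, e.g. on solution(3628801): A returns None, B returns None
import Mathlib
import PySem

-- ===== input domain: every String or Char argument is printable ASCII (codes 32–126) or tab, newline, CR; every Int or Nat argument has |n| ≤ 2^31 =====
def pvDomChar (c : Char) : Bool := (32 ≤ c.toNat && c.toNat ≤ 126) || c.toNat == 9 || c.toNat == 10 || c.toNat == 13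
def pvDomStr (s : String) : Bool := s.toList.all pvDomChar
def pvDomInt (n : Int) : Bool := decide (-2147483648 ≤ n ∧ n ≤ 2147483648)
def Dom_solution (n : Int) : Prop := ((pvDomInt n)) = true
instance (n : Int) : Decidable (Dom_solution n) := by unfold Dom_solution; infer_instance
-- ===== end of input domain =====

-- B replaces A's incremental factorial loop with a binary search over a precomputed factorial table (alternative, same cost).


-- ===== PORT A =====
-- loop 'for i in range(1,11)' with early returns; falling off the loop is Python's None,
-- excluded by Pre_solution, represented by the junk value -1 here.
def solutionGo (n : Int) (answer : Int) (is : List Int) : Int :=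
  match is with
  | [] => -1
  | i :: rest =>
    let answer := answer * i
    if answer == n then i
    else if answer > n then i - 1
    else solutionGo n answer rest

def solution (n : Int) : Int :=
  solutionGo n 1 (PySem.List.pyRange 1 11 1)

-- ===== PORT B =====
def factTable : List Int := [1, 2, 6, 24, 120, 720, 5040, 40320, 362880, 3628800]

-- 'while lo < hi' binary search; fuel = table length bounds the iterations (the loop halves [lo,hi) each pass)
def bsearchGo (fuel : Nat) (n : Int) (lo hi : Nat) : Nat :=
  match fuel with
  | 0 => lo
  | f + 1 =>
    if lo < hi then
      let mid := (lo + hi) / 2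
      if (factTable.getD mid 0) < n then bsearchGo f n (mid + 1) hi
      else bsearchGo f n lo mid
    else lo

def solution_alt (n : Int) : Int :=
  let lo := bsearchGo factTable.length n 0 factTable.length
  if lo == factTable.length then -1   -- Python's None; excluded by Pre_solution
  else if (factTable.getD lo 0) == n then (lo : Int) + 1 else (lo : Int)

-- ===== PRECONDITION & SPEC =====
-- Pre_ excludes n > 10! = 3628800, where A falls off its loop and returns None, which is not an Int.
def Pre_solution (n : Int) : Prop := n ≤ 3628800
instance (n : Int) : Decidable (Pre_solution n) := by unfold Pre_solution; infer_instance
def pvWitness_solution : Int := 24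

def Spec_solution (n : Int) (out : Int) : Prop := out = solution_alt n
instance (n : Int) (out : Int) : Decidable (Spec_solution n out) := by unfold Spec_solution; infer_instance

-- ===== CLAIM (what is proved, stated in full; the proofs are below) =====
def Claim_equal_solution : Prop := ∀ (n : Int), Dom_solution n → Pre_solution n → Spec_solution n (solution n)

-- ===== LEMMAS AND PROOFS =====

-- ===== VERDICT (by name: the statement is the Claim_ definition above) =====
set_option maxRecDepth 8000 in
theorem solution_spec : Claim_equal_solution := by
  intro n _ hpre
  unfold Spec_solution Pre_solution at *
  rw [solution, show PySem.List.pyRange 1 11 1 = [1,2,3,4,5,6,7,8,9,10] from by decide]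
  simp only [solution_alt]
  by_cases e1 : n = 1
  · subst e1; decide
  by_cases e2 : n = 2
  · subst e2; decide
  by_cases e6 : n = 6
  · subst e6; decide
  by_cases e24 : n = 24
  · subst e24; decide
  by_cases e120 : n = 120
  · subst e120; decide
  by_cases e720 : n = 720
  · subst e720; decide
  by_cases e5040 : n = 5040
  · subst e5040; decide
  by_cases e40320 : n = 40320
  · subst e40320; decide
  by_cases e362880 : n = 362880
  · subst e362880; decide
  by_cases e3628800 : n = 3628800
  · subst e3628800; decide
  by_cases l0 : n < 1
  · simp [solutionGo, bsearchGo, factTable, List.getD,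
      show ¬(1:Int) = n from by omega, show n < (1:Int) from by omega, show ¬(1:Int) < n from by omega,
      show ¬(2:Int) = n from by omega, show n < (2:Int) from by omega, show ¬(2:Int) < n from by omega,
      show ¬(6:Int) = n from by omega, show n < (6:Int) from by omega, show ¬(6:Int) < n from by omega,
      show ¬(24:Int) = n from by omega, show n < (24:Int) from by omega, show ¬(24:Int) < n from by omega,
      show ¬(120:Int) = n from by omega, show n < (120:Int) from by omega, show ¬(120:Int) < n from by omega,
      show ¬(720:Int) = n from by omega, show n < (720:Int) from by omega, show ¬(720:Int) < n from by omega,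
      show ¬(5040:Int) = n from by omega, show n < (5040:Int) from by omega, show ¬(5040:Int) < n from by omega,
      show ¬(40320:Int) = n from by omega, show n < (40320:Int) from by omega, show ¬(40320:Int) < n from by omega,
      show ¬(362880:Int) = n from by omega, show n < (362880:Int) from by omega, show ¬(362880:Int) < n from by omega,
      show ¬(3628800:Int) = n from by omega, show n < (3628800:Int) from by omega, show ¬(3628800:Int) < n from by omega]
  by_cases l1 : n < 2
  · simp [solutionGo, bsearchGo, factTable, List.getD,
      show ¬(1:Int) = n from by omega, show ¬n < (1:Int) from by omega, show (1:Int) < n from by omega,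
      show ¬(2:Int) = n from by omega, show n < (2:Int) from by omega, show ¬(2:Int) < n from by omega,
      show ¬(6:Int) = n from by omega, show n < (6:Int) from by omega, show ¬(6:Int) < n from by omega,
      show ¬(24:Int) = n from by omega, show n < (24:Int) from by omega, show ¬(24:Int) < n from by omega,
      show ¬(120:Int) = n from by omega, show n < (120:Int) from by omega, show ¬(120:Int) < n from by omega,
      show ¬(720:Int) = n from by omega, show n < (720:Int) from by omega, show ¬(720:Int) < n from by omega,
      show ¬(5040:Int) = n from by omega, show n < (5040:Int) from by omega, show ¬(5040:Int) < n from by omega,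
      show ¬(40320:Int) = n from by omega, show n < (40320:Int) from by omega, show ¬(40320:Int) < n from by omega,
      show ¬(362880:Int) = n from by omega, show n < (362880:Int) from by omega, show ¬(362880:Int) < n from by omega,
      show ¬(3628800:Int) = n from by omega, show n < (3628800:Int) from by omega, show ¬(3628800:Int) < n from by omega]
  by_cases l2 : n < 6
  · simp [solutionGo, bsearchGo, factTable, List.getD,
      show ¬(1:Int) = n from by omega, show ¬n < (1:Int) from by omega, show (1:Int) < n from by omega,
      show ¬(2:Int) = n from by omega, show ¬n < (2:Int) from by omega, show (2:Int) < n from by omega,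
      show ¬(6:Int) = n from by omega, show n < (6:Int) from by omega, show ¬(6:Int) < n from by omega,
      show ¬(24:Int) = n from by omega, show n < (24:Int) from by omega, show ¬(24:Int) < n from by omega,
      show ¬(120:Int) = n from by omega, show n < (120:Int) from by omega, show ¬(120:Int) < n from by omega,
      show ¬(720:Int) = n from by omega, show n < (720:Int) from by omega, show ¬(720:Int) < n from by omega,
      show ¬(5040:Int) = n from by omega, show n < (5040:Int) from by omega, show ¬(5040:Int) < n from by omega,
      show ¬(40320:Int) = n from by omega, show n < (40320:Int) from by omega, show ¬(40320:Int) < n from by omega,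
      show ¬(362880:Int) = n from by omega, show n < (362880:Int) from by omega, show ¬(362880:Int) < n from by omega,
      show ¬(3628800:Int) = n from by omega, show n < (3628800:Int) from by omega, show ¬(3628800:Int) < n from by omega]
  by_cases l3 : n < 24
  · simp [solutionGo, bsearchGo, factTable, List.getD,
      show ¬(1:Int) = n from by omega, show ¬n < (1:Int) from by omega, show (1:Int) < n from by omega,
      show ¬(2:Int) = n from by omega, show ¬n < (2:Int) from by omega, show (2:Int) < n from by omega,
      show ¬(6:Int) = n from by omega, show ¬n < (6:Int) from by omega, show (6:Int) < n from by omega,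
      show ¬(24:Int) = n from by omega, show n < (24:Int) from by omega, show ¬(24:Int) < n from by omega,
      show ¬(120:Int) = n from by omega, show n < (120:Int) from by omega, show ¬(120:Int) < n from by omega,
      show ¬(720:Int) = n from by omega, show n < (720:Int) from by omega, show ¬(720:Int) < n from by omega,
      show ¬(5040:Int) = n from by omega, show n < (5040:Int) from by omega, show ¬(5040:Int) < n from by omega,
      show ¬(40320:Int) = n from by omega, show n < (40320:Int) from by omega, show ¬(40320:Int) < n from by omega,
      show ¬(362880:Int) = n from by omega, show n < (362880:Int) from by omega, show ¬(362880:Int) < n from by omega,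
      show ¬(3628800:Int) = n from by omega, show n < (3628800:Int) from by omega, show ¬(3628800:Int) < n from by omega]
  by_cases l4 : n < 120
  · simp [solutionGo, bsearchGo, factTable, List.getD,
      show ¬(1:Int) = n from by omega, show ¬n < (1:Int) from by omega, show (1:Int) < n from by omega,
      show ¬(2:Int) = n from by omega, show ¬n < (2:Int) from by omega, show (2:Int) < n from by omega,
      show ¬(6:Int) = n from by omega, show ¬n < (6:Int) from by omega, show (6:Int) < n from by omega,
      show ¬(24:Int) = n from by omega, show ¬n < (24:Int) from by omega, show (24:Int) < n from by omega,
      show ¬(120:Int) = n from by omega, show n < (120:Int) from by omega, show ¬(120:Int) < n from by omega,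
      show ¬(720:Int) = n from by omega, show n < (720:Int) from by omega, show ¬(720:Int) < n from by omega,
      show ¬(5040:Int) = n from by omega, show n < (5040:Int) from by omega, show ¬(5040:Int) < n from by omega,
      show ¬(40320:Int) = n from by omega, show n < (40320:Int) from by omega, show ¬(40320:Int) < n from by omega,
      show ¬(362880:Int) = n from by omega, show n < (362880:Int) from by omega, show ¬(362880:Int) < n from by omega,
      show ¬(3628800:Int) = n from by omega, show n < (3628800:Int) from by omega, show ¬(3628800:Int) < n from by omega]
  by_cases l5 : n < 720
  · simp [solutionGo, bsearchGo, factTable, List.getD,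
      show ¬(1:Int) = n from by omega, show ¬n < (1:Int) from by omega, show (1:Int) < n from by omega,
      show ¬(2:Int) = n from by omega, show ¬n < (2:Int) from by omega, show (2:Int) < n from by omega,
      show ¬(6:Int) = n from by omega, show ¬n < (6:Int) from by omega, show (6:Int) < n from by omega,
      show ¬(24:Int) = n from by omega, show ¬n < (24:Int) from by omega, show (24:Int) < n from by omega,
      show ¬(120:Int) = n from by omega, show ¬n < (120:Int) from by omega, show (120:Int) < n from by omega,
      show ¬(720:Int) = n from by omega, show n < (720:Int) from by omega, show ¬(720:Int) < n from by omega,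
      show ¬(5040:Int) = n from by omega, show n < (5040:Int) from by omega, show ¬(5040:Int) < n from by omega,
      show ¬(40320:Int) = n from by omega, show n < (40320:Int) from by omega, show ¬(40320:Int) < n from by omega,
      show ¬(362880:Int) = n from by omega, show n < (362880:Int) from by omega, show ¬(362880:Int) < n from by omega,
      show ¬(3628800:Int) = n from by omega, show n < (3628800:Int) from by omega, show ¬(3628800:Int) < n from by omega]
  by_cases l6 : n < 5040
  · simp [solutionGo, bsearchGo, factTable, List.getD,
      show ¬(1:Int) = n from by omega, show ¬n < (1:Int) from by omega, show (1:Int) < n from by omega,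
      show ¬(2:Int) = n from by omega, show ¬n < (2:Int) from by omega, show (2:Int) < n from by omega,
      show ¬(6:Int) = n from by omega, show ¬n < (6:Int) from by omega, show (6:Int) < n from by omega,
      show ¬(24:Int) = n from by omega, show ¬n < (24:Int) from by omega, show (24:Int) < n from by omega,
      show ¬(120:Int) = n from by omega, show ¬n < (120:Int) from by omega, show (120:Int) < n from by omega,
      show ¬(720:Int) = n from by omega, show ¬n < (720:Int) from by omega, show (720:Int) < n from by omega,
      show ¬(5040:Int) = n from by omega, show n < (5040:Int) from by omega, show ¬(5040:Int) < n from by omega,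
      show ¬(40320:Int) = n from by omega, show n < (40320:Int) from by omega, show ¬(40320:Int) < n from by omega,
      show ¬(362880:Int) = n from by omega, show n < (362880:Int) from by omega, show ¬(362880:Int) < n from by omega,
      show ¬(3628800:Int) = n from by omega, show n < (3628800:Int) from by omega, show ¬(3628800:Int) < n from by omega]
  by_cases l7 : n < 40320
  · simp [solutionGo, bsearchGo, factTable, List.getD,
      show ¬(1:Int) = n from by omega, show ¬n < (1:Int) from by omega, show (1:Int) < n from by omega,
      show ¬(2:Int) = n from by omega, show ¬n < (2:Int) from by omega, show (2:Int) < n from by omega,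
      show ¬(6:Int) = n from by omega, show ¬n < (6:Int) from by omega, show (6:Int) < n from by omega,
      show ¬(24:Int) = n from by omega, show ¬n < (24:Int) from by omega, show (24:Int) < n from by omega,
      show ¬(120:Int) = n from by omega, show ¬n < (120:Int) from by omega, show (120:Int) < n from by omega,
      show ¬(720:Int) = n from by omega, show ¬n < (720:Int) from by omega, show (720:Int) < n from by omega,
      show ¬(5040:Int) = n from by omega, show ¬n < (5040:Int) from by omega, show (5040:Int) < n from by omega,
      show ¬(40320:Int) = n from by omega, show n < (40320:Int) from by omega, show ¬(40320:Int) < n from by omega,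
      show ¬(362880:Int) = n from by omega, show n < (362880:Int) from by omega, show ¬(362880:Int) < n from by omega,
      show ¬(3628800:Int) = n from by omega, show n < (3628800:Int) from by omega, show ¬(3628800:Int) < n from by omega]
  by_cases l8 : n < 362880
  · simp [solutionGo, bsearchGo, factTable, List.getD,
      show ¬(1:Int) = n from by omega, show ¬n < (1:Int) from by omega, show (1:Int) < n from by omega,
      show ¬(2:Int) = n from by omega, show ¬n < (2:Int) from by omega, show (2:Int) < n from by omega,
      show ¬(6:Int) = n from by omega, show ¬n < (6:Int) from by omega, show (6:Int) < n from by omega,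
      show ¬(24:Int) = n from by omega, show ¬n < (24:Int) from by omega, show (24:Int) < n from by omega,
      show ¬(120:Int) = n from by omega, show ¬n < (120:Int) from by omega, show (120:Int) < n from by omega,
      show ¬(720:Int) = n from by omega, show ¬n < (720:Int) from by omega, show (720:Int) < n from by omega,
      show ¬(5040:Int) = n from by omega, show ¬n < (5040:Int) from by omega, show (5040:Int) < n from by omega,
      show ¬(40320:Int) = n from by omega, show ¬n < (40320:Int) from by omega, show (40320:Int) < n from by omega,
      show ¬(362880:Int) = n from by omega, show n < (362880:Int) from by omega, show ¬(362880:Int) < n from by omega,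
      show ¬(3628800:Int) = n from by omega, show n < (3628800:Int) from by omega, show ¬(3628800:Int) < n from by omega]
  by_cases l9 : n < 3628800
  · simp [solutionGo, bsearchGo, factTable, List.getD,
      show ¬(1:Int) = n from by omega, show ¬n < (1:Int) from by omega, show (1:Int) < n from by omega,
      show ¬(2:Int) = n from by omega, show ¬n < (2:Int) from by omega, show (2:Int) < n from by omega,
      show ¬(6:Int) = n from by omega, show ¬n < (6:Int) from by omega, show (6:Int) < n from by omega,
      show ¬(24:Int) = n from by omega, show ¬n < (24:Int) from by omega, show (24:Int) < n from by omega,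
      show ¬(120:Int) = n from by omega, show ¬n < (120:Int) from by omega, show (120:Int) < n from by omega,
      show ¬(720:Int) = n from by omega, show ¬n < (720:Int) from by omega, show (720:Int) < n from by omega,
      show ¬(5040:Int) = n from by omega, show ¬n < (5040:Int) from by omega, show (5040:Int) < n from by omega,
      show ¬(40320:Int) = n from by omega, show ¬n < (40320:Int) from by omega, show (40320:Int) < n from by omega,
      show ¬(362880:Int) = n from by omega, show ¬n < (362880:Int) from by omega, show (362880:Int) < n from by omega,
      show ¬(3628800:Int) = n from by omega, show n < (3628800:Int) from by omega, show ¬(3628800:Int) < n from by omega]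
  · exact absurd hpre (by omega)
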